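-- pv_equiv track=rewrite | github.com/Ravi-S-Chauhan/python_practice | permutationWithSpaces.py | solve
-- ===== SOURCE A (Python) =====
-- def solve(ip, op, uniqueset):
--     if len(ip) == 0:
--         uniqueset.append(op)
--         return
--     op1 = op+ ip[0]
--     op2 = op +" " + ip[0]
--     ip = ip[1:]
--     solve(ip, op1, uniqueset)
--     solve(ip, op2, uniqueset)
--     return uniqueset
-- ===== SOURCE B (Python) =====
-- def solve(ip, op, uniqueset):
--     n = len(ip)
--     for mask in range(1 << n):
--         s = op
--         shift = n
--         for ch in ip:
--             shift -= 1
--             if (mask >> shift) & 1: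
--                 s += ' '
--             s += ch
--         uniqueset.append(s)
--     return uniqueset
-- ===== Notes on version B (the rewrite author's own statement) =====
-- stated objective: alternative
-- what changed: Replaces the two-way branching recursion by a single iterative bitmask enumeration: each of the 2^len(ip) output strings is built directly from a mask whose bits (first gap = most significant) say where a space goes, reproducing the DFS order without recursion.
-- outside the precondition, e.g. on solve('', 'x', []): A returns None, B returns ['x']
import Mathlib
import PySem

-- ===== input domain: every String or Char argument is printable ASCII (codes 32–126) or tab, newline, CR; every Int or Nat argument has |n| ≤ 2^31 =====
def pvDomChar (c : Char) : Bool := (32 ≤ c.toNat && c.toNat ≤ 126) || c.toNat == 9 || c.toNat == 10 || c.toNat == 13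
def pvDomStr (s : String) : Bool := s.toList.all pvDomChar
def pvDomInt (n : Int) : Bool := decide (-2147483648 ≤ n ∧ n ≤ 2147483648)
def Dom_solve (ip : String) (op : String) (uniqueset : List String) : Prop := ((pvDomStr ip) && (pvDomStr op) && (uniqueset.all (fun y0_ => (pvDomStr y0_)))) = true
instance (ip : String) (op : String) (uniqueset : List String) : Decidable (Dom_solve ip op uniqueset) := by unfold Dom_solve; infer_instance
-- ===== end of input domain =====

-- B replaces A's two-way recursion by one loop over bitmasks; equivalence of the return value (both mutate uniqueset in Python).

-- ===== PORT A =====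
-- recursion on the character list: the len(ip)==0 test is the pattern match,
-- op1/op2 are the two branches, the two recursive calls thread the mutated list
def solveRec : List Char → String → List String → List String
  | [], op, uniqueset => uniqueset ++ [op]
  | c :: rest, op, uniqueset =>
    let op1 := op.push c
    let op2 := (op ++ " ").push c
    let u1 := solveRec rest op1 uniqueset
    solveRec rest op2 u1

def solve (ip : String) (op : String) (uniqueset : List String) : List String :=
  solveRec ip.toList op uniqueset

-- ===== PORT B =====
-- inner loop of Source B: shift counts down from n, space iff the mask bit at shift is set
def buildMask (mask : Nat) : String → List Char → String
  | s, [] => s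
  | s, c :: rest =>
    let s := if (mask >>> rest.length) &&& 1 == 1 then (s ++ " ").push c else s.push c
    buildMask mask s rest

def solve_alt (ip : String) (op : String) (uniqueset : List String) : List String :=
  let cs := ip.toList
  (List.range (2 ^ cs.length)).foldl (fun acc mask => acc ++ [buildMask mask op cs]) uniqueset

-- ===== PRECONDITION & SPEC =====
-- Pre_ excludes ip = "" because there Python A appends op but returns None, not a list.
def Pre_solve (ip : String) (op : String) (uniqueset : List String) : Prop := ip ≠ ""
instance (ip : String) (op : String) (uniqueset : List String) : Decidable (Pre_solve ip op uniqueset) := by unfold Pre_solve; infer_instance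
def pvWitness_solve : String × String × List String := ("ab", "x", [])
def Spec_solve (ip : String) (op : String) (uniqueset : List String) (out : List String) : Prop := out = solve_alt ip op uniqueset
instance (ip : String) (op : String) (uniqueset : List String) (out : List String) : Decidable (Spec_solve ip op uniqueset out) := by unfold Spec_solve; infer_instance

-- ===== CLAIM (what is proved, stated in full; the proofs are below) =====
def Claim_equal_solve : Prop := ∀ (ip : String) (op : String) (uniqueset : List String), Dom_solve ip op uniqueset → Pre_solve ip op uniqueset → Spec_solve ip op uniqueset (solve ip op uniqueset)

-- ===== LEMMAS AND PROOFS =====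

-- foldl that only appends = append of a map
theorem foldl_append_map {α β : Type} (f : α → β) (l : List α) (u : List β) :
    l.foldl (fun acc x => acc ++ [f x]) u = u ++ l.map f := by
  induction l generalizing u with
  | nil => simp
  | cons x xs ih => simp [List.foldl, ih]

-- bits below k of 2^k + m (m < 2^k) are the bits of m
theorem bit_add_pow (k j m : Nat) (hm : m < 2 ^ k) (hj : j < k) :
    ((2 ^ k + m) >>> j) &&& 1 = (m >>> j) &&& 1 := by
  have h1 : (2 ^ k + m) >>> j = 2 ^ (k - j) + m >>> j := by
    have hk : 2 ^ k = 2 ^ (k - j) * 2 ^ j := by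
      rw [← pow_add]; congr 1; omega
    simp only [Nat.shiftRight_eq_div_pow, hk]
    rw [Nat.add_comm, Nat.add_mul_div_right _ _ (Nat.pow_pos (by norm_num : 0 < 2))]
    omega
  have h2 : 2 ^ (k - j) % 2 = 0 := by
    have : k - j = (k - j - 1) + 1 := by omega
    rw [this, pow_succ]; simp
  rw [h1, Nat.and_one_is_mod, Nat.and_one_is_mod, Nat.add_mod, h2]
  simp

-- buildMask only looks at bits below the list length
theorem buildMask_congr (cs : List Char) (m1 m2 : Nat)
    (h : ∀ j, j < cs.length → (m1 >>> j) &&& 1 = (m2 >>> j) &&& 1) :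
    ∀ s, buildMask m1 s cs = buildMask m2 s cs := by
  induction cs with
  | nil => intro s; rfl
  | cons c rest ih =>
    intro s
    have hb := h rest.length (by simp)
    simp only [buildMask, hb]
    exact ih (fun j hj => h j (by simp; omega)) _

-- high bit clear: buildMask on c::rest with mask < 2^rest.length starts with no space
theorem buildMask_low (c : Char) (rest : List Char) (m : Nat) (hm : m < 2 ^ rest.length) (s : String) :
    buildMask m s (c :: rest) = buildMask m (s.push c) rest := by
  have h0 : (m >>> rest.length) &&& 1 = 0 := by
    have : m >>> rest.length = 0 := by
      rw [Nat.shiftRight_eq_div_pow]; exact Nat.div_eq_of_lt hm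
    simp [this]
  simp [buildMask, h0]

-- high bit set: buildMask on c::rest with mask 2^rest.length + m starts with a space
theorem buildMask_high (c : Char) (rest : List Char) (m : Nat) (hm : m < 2 ^ rest.length) (s : String) :
    buildMask (2 ^ rest.length + m) s (c :: rest) = buildMask m ((s ++ " ").push c) rest := by
  have h1 : ((2 ^ rest.length + m) >>> rest.length) &&& 1 = 1 := by
    rw [Nat.shiftRight_eq_div_pow]
    have : (2 ^ rest.length + m) / 2 ^ rest.length = 1 := by
      rw [Nat.add_div_left m (Nat.pow_pos (by norm_num : 0 < 2)), Nat.div_eq_of_lt hm]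
    simp [this]
  simp only [buildMask, h1]
  exact buildMask_congr rest _ m (fun j hj => bit_add_pow _ j m hm hj) _

-- main invariant: A's recursion produces exactly the masks 0 .. 2^n-1 in order
theorem solveRec_eq_masks (cs : List Char) :
    ∀ (op : String) (u : List String),
      solveRec cs op u = u ++ (List.range (2 ^ cs.length)).map (fun m => buildMask m op cs) := by
  induction cs with
  | nil => intro op u; simp [solveRec, buildMask]
  | cons c rest ih =>
    intro op u
    have hsplit : List.range (2 ^ (c :: rest).length)
        = List.range (2 ^ rest.length) ++ (List.range (2 ^ rest.length)).map (fun m => 2 ^ rest.length + m) := by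
      have : 2 ^ (c :: rest).length = 2 ^ rest.length + 2 ^ rest.length := by
        simp [pow_succ]; ring
      rw [this, List.range_add]
    simp only [solveRec, ih, hsplit, List.map_append, List.map_map]
    rw [List.append_assoc]
    congr 1
    congr 1
    · exact List.map_congr_left (fun m hm => (buildMask_low c rest m (List.mem_range.mp hm) op).symm)
    · refine List.map_congr_left (fun m hm => ?_)
      simp [Function.comp]
      exact (buildMask_high c rest m (List.mem_range.mp hm) op).symm

-- ===== VERDICT (by name: the statement is the Claim_ definition above) =====
theorem solve_spec : Claim_equal_solve := by
  intro ip op uniqueset _ _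
  unfold Spec_solve solve solve_alt
  rw [solveRec_eq_masks, foldl_append_map]
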